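-- pv_equiv track=rewrite | github.com/DannyZednickova/_DIPLOMKA | CTI_Code/middleware_to_neo/NewOpenvasToNEO.py | split_cve_tokens
-- ===== SOURCE A (Python) =====
-- from typing import Any, Dict, Iterable, List, Optional, Set, Tuple
--
-- def split_cve_tokens(s: str) -> List[str]:
--     """
--     Rozdělí string typu "CVE-2024-1234, CVE-2024-9999" na jednotlivé CVE.
--     """
--     # typické oddělovače: čárka, mezera, newline
--     raw = s.replace("\n", " ").replace("\t", " ").replace(";", ",")
--     parts = [p.strip() for p in raw.split(",")]
--     tokens: List[str] = []
--     for p in parts: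
--         if not p:
--             continue
--         # ještě rozbij podle mezer
--         for t in p.split():
--             t = t.strip().upper()
--             if t.startswith("CVE-"):
--                 tokens.append(t)
--     return tokens
-- ===== SOURCE B (Python) =====
-- import re
--
-- def split_cve_tokens(s):
--     """Single-pass tokenization: split once on any run of separators, keep CVE- tokens."""
--     return [t.upper() for t in re.split(r'[ \t\r\n,;]+', s)
--             if t.upper().startswith("CVE-")]
-- ===== Notes on version B (the rewrite author's own statement) =====
-- stated objective: idiomatic
-- what changed: Replaces the three-stage replace/split/strip pipeline with nested loops by a single regex split on runs of separator characters followed by one comprehension keeping (uppercased) tokens that carry the CVE prefix.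
import Mathlib
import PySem

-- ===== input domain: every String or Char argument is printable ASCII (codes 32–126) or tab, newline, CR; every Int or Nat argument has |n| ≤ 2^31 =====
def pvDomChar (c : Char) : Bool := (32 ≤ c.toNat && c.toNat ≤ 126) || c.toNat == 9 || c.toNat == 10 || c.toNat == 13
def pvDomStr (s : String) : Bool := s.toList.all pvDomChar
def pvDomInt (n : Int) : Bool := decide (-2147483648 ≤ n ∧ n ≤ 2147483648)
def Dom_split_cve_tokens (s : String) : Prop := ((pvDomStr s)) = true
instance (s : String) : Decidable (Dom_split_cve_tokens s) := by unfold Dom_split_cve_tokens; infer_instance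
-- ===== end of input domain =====

-- B replaces A's replace/split(",")/strip/nested-split pipeline by one split on runs of
-- separator characters followed by a single filter/map pass (alternative decomposition,
-- same O(n) cost).

-- ===== PORT A =====
def split_cve_tokens (s : String) : List String :=
  let raw := PySem.Chars.replace
    (PySem.Chars.replace (PySem.Chars.replace s.toList ['\n'] [' ']) ['\t'] [' '])
    [';'] [',']
  let parts := (PySem.Chars.splitOn raw [',']).map PySem.Chars.strip
  let tokens := parts.foldl (fun tokens p =>
    if p.isEmpty then tokens
    else (PySem.Chars.split₀ p).foldl (fun tokens t =>
      let t' := PySem.Chars.upper (PySem.Chars.strip t)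
      if PySem.Chars.startswith t' ['C', 'V', 'E', '-'] then tokens ++ [t'] else tokens)
      tokens) []
  tokens.map String.ofList

-- ===== PORT B =====
def pvIsDelim (c : Char) : Bool :=
  c == ' ' || c == '\t' || c == '\r' || c == '\n' || c == ',' || c == ';'

-- Hand port of re.split(r'[ \t\r\n,;]+', s) (no regex engine in Lean): cut the next
-- piece before the first delimiter, skip the whole delimiter run, recurse; the
-- (possibly empty) boundary pieces are kept.  Exact for this character-class-plus pattern.
def pvReSplit (cs : List Char) : List (List Char) :=
  if h : (cs.dropWhile (fun c => !pvIsDelim c)).isEmpty then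
    [cs.takeWhile (fun c => !pvIsDelim c)]
  else
    cs.takeWhile (fun c => !pvIsDelim c) ::
      pvReSplit ((cs.dropWhile (fun c => !pvIsDelim c)).tail.dropWhile pvIsDelim)
termination_by cs.length
decreasing_by
  have h2 : (cs.dropWhile (fun c => !pvIsDelim c)).length ≤ cs.length :=
    List.length_dropWhile_le _ _
  have h1 : (((cs.dropWhile (fun c => !pvIsDelim c)).tail).dropWhile pvIsDelim).length ≤
      ((cs.dropWhile (fun c => !pvIsDelim c)).tail).length := List.length_dropWhile_le _ _
  have h3 : ((cs.dropWhile (fun c => !pvIsDelim c)).tail).length <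
      (cs.dropWhile (fun c => !pvIsDelim c)).length := by
    have hne : cs.dropWhile (fun c => !pvIsDelim c) ≠ [] := by
      simpa [List.isEmpty_iff] using h
    cases hcs : cs.dropWhile (fun c => !pvIsDelim c) with
    | nil => exact absurd hcs hne
    | cons x r => simp
  omega

def split_cve_tokens_alt (s : String) : List String :=
  ((pvReSplit s.toList).filter
      (fun t => PySem.Chars.startswith (PySem.Chars.upper t) ['C', 'V', 'E', '-'])).map
    (fun t => String.ofList (PySem.Chars.upper t))

-- ===== PRECONDITION & SPEC =====
def Spec_split_cve_tokens (s : String) (out : List String) : Prop := out = split_cve_tokens_alt s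
instance (s : String) (out : List String) : Decidable (Spec_split_cve_tokens s out) := by unfold Spec_split_cve_tokens; infer_instance

-- ===== CLAIM (what is proved, stated in full; the proofs are below) =====
def Claim_equal_split_cve_tokens : Prop := ∀ (s : String), Dom_split_cve_tokens s → Spec_split_cve_tokens s (split_cve_tokens s)

-- ===== LEMMAS AND PROOFS =====

-- nonempty test on pieces
def pvNE (x : List Char) : Bool := !x.isEmpty

-- split on a character predicate, keeping empty pieces (the common shape both ports reduce to)
def pvSplitP (p : Char → Bool) : List Char → List (List Char)
  | [] => [[]]
  | c :: t => if p c then [] :: pvSplitP p t else (pvSplitP p t).modifyHead (c :: ·)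

-- the composite of A's three single-character replaces
def pvN (c : Char) : Char :=
  let c1 := if c == '\n' then ' ' else c
  let c2 := if c1 == '\t' then ' ' else c1
  if c2 == ';' then ',' else c2

lemma pvSplitP_decomp (p : Char → Bool) (l : List Char) :
    pvSplitP p l = l.takeWhile (fun c => !p c) ::
      (match l.dropWhile (fun c => !p c) with
       | [] => []
       | _ :: r => pvSplitP p r) := by
  induction l with
  | nil => simp [pvSplitP]
  | cons c t ih =>
    by_cases h : p c
    · simp [pvSplitP, h]
    · simp only [pvSplitP, h, if_neg, Bool.not_eq_true]
      rw [ih]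
      simp [List.takeWhile_cons, List.dropWhile_cons, h]

lemma pvSplitP_ne_nil (p : Char → Bool) (l : List Char) : pvSplitP p l ≠ [] := by
  rw [pvSplitP_decomp]; simp

lemma pvSplitP_headD (p : Char → Bool) (l : List Char) :
    (pvSplitP p l).headD [] = l.takeWhile (fun c => !p c) := by
  rw [pvSplitP_decomp]; rfl

lemma pv_modifyHead_id (X : List (List Char)) : X.modifyHead (fun x => x) = X := by
  cases X <;> simp

lemma pv_modifyHead_cons (f : List Char → List Char) (a : List Char)
    (l : List (List Char)) : List.modifyHead f (a :: l) = f a :: l := by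
  simp

lemma pv_filter_cons_ne (w : List Char) (hw : w ≠ []) (M : List (List Char)) :
    (w :: M).filter pvNE = w :: M.filter pvNE := by
  simp [List.filter_cons, pvNE, hw]

lemma pv_filter_cons_nil (M : List (List Char)) :
    (([] : List Char) :: M).filter pvNE = M.filter pvNE := by
  simp [List.filter_cons, pvNE]

-- dropping a head piece: from filtered-cons equality to filtered-tail equality
lemma pv_tail_of_filter_cons {w : List Char} {M1 M2 : List (List Char)}
    (h : (w :: M1).filter pvNE = (w :: M2).filter pvNE) :
    M1.filter pvNE = M2.filter pvNE := by
  by_cases hw : w = []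
  · subst hw; rwa [pv_filter_cons_nil, pv_filter_cons_nil] at h
  · rw [pv_filter_cons_ne w hw, pv_filter_cons_ne w hw] at h
    have := congrArg List.tail h
    simpa using this

lemma pv_dropWhile_no (p : Char → Bool) (x : List Char) (h : ∀ c ∈ x, p c = false) :
    x.dropWhile p = x := by
  cases x with
  | nil => rfl
  | cons c t => simp [List.dropWhile_cons, h c (by simp)]

lemma pv_takeWhile_all (p : Char → Bool) (ss : List Char) (h : ∀ c ∈ ss, p c = true) :
    ss.takeWhile (fun c => !p c) = [] := by
  cases ss with
  | nil => rfl
  | cons c t => simp [List.takeWhile_cons, h c (by simp)]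

lemma pv_takeWhile_append_all (p : Char → Bool) (t ss : List Char)
    (h : ∀ c ∈ ss, p c = true) :
    (t ++ ss).takeWhile (fun c => !p c) = t.takeWhile (fun c => !p c) := by
  rw [List.takeWhile_append]
  split
  · rename_i hlen
    have htw : t.takeWhile (fun c => !p c) = t :=
      (List.takeWhile_prefix _).eq_of_length hlen
    rw [pv_takeWhile_all p ss h, htw]; simp
  · rfl

-- ===== the PySem go-invariants: replace / splitOn / split₀ on single-char patterns =====

lemma pv_replace_go (a b : Char) :
    ∀ (l : List Char) (fuel : Nat) (acc : List Char), l.length ≤ fuel →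
      PySem.Chars.replace.go [a] [b] fuel l acc
        = acc.reverse ++ l.map (fun c => if c == a then b else c) := by
  intro l
  induction l with
  | nil =>
    intro fuel acc _
    cases fuel <;> simp [PySem.Chars.replace.go]
  | cons c t ih =>
    intro fuel acc hlen
    cases fuel with
    | zero => simp at hlen
    | succ f =>
      rw [PySem.Chars.replace.go]
      simp only [List.length_cons] at hlen
      by_cases h : c = a
      · subst h
        have hpre : [c].isPrefixOf (c :: t) = true := by simp [List.isPrefixOf]
        rw [if_pos hpre]
        rw [show List.drop [c].length (c :: t) = t from rfl]
        rw [ih f _ (by omega)]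
        simp
      · have hpre : [a].isPrefixOf (c :: t) = false := by
          simp [List.isPrefixOf]; exact fun hh => absurd hh.symm h
        rw [if_neg (by simp [hpre])]
        rw [ih f _ (by omega)]
        simp [h]

lemma pv_replace_single (a b : Char) (l : List Char) :
    PySem.Chars.replace l [a] [b] = l.map (fun c => if c == a then b else c) := by
  rw [PySem.Chars.replace]
  simp only [List.isEmpty_cons]
  rw [if_neg (by simp)]
  rw [pv_replace_go a b l l.length [] (le_refl _)]
  simp

lemma pv_splitOn_go (a : Char) :
    ∀ (l : List Char) (fuel : Nat) (cur : List Char) (acc : List (List Char)),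
      l.length < fuel →
      PySem.Chars.splitOn.go [a] fuel l cur acc
        = acc.reverse ++ (pvSplitP (fun c => c == a) l).modifyHead (cur.reverse ++ ·) := by
  intro l
  induction l with
  | nil =>
    intro fuel cur acc hlen
    cases fuel with
    | zero => omega
    | succ f => simp [PySem.Chars.splitOn.go, pvSplitP]
  | cons c t ih =>
    intro fuel cur acc hlen
    cases fuel with
    | zero => omega
    | succ f =>
      rw [PySem.Chars.splitOn.go]
      simp only [List.length_cons] at hlen
      by_cases h : a = c
      · subst h
        have hpre : [a].isPrefixOf (a :: t) = true := by simp [List.isPrefixOf]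
        rw [if_pos hpre]
        rw [show List.drop [a].length (a :: t) = t from rfl]
        rw [ih f [] (cur.reverse :: acc) (by omega)]
        simp [pvSplitP, pv_modifyHead_id]
      · have hpre : [a].isPrefixOf (c :: t) = false := by
          simp [List.isPrefixOf]; exact fun hh => absurd hh h
        rw [if_neg (by simp [hpre])]
        rw [ih f (c :: cur) acc (by omega)]
        have hca : (c == a) = false := by
          simp; exact fun hh => absurd hh.symm h
        simp only [pvSplitP, hca, Bool.false_eq_true, if_neg, not_false_iff]
        cases hP : pvSplitP (fun c => c == a) t with
        | nil => exact absurd hP (pvSplitP_ne_nil _ _)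
        | cons y ys => simp [List.modifyHead, List.append_assoc]

lemma pv_splitOn_single (a : Char) (l : List Char) :
    PySem.Chars.splitOn l [a] = pvSplitP (fun c => c == a) l := by
  rw [PySem.Chars.splitOn]
  rw [pv_splitOn_go a l (l.length + 1) [] [] (by omega)]
  simp [pv_modifyHead_id]

lemma pv_split0_go :
    ∀ (l cur : List Char) (acc : List (List Char)),
      PySem.Chars.split₀.go l cur acc
        = acc.reverse ++
          ((pvSplitP PySem.Chars.isspace l).modifyHead (cur.reverse ++ ·)).filter pvNE := by
  intro l
  induction l with
  | nil =>
    intro cur acc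
    rw [PySem.Chars.split₀.go]
    by_cases h : cur.isEmpty
    · have hc : cur = [] := by simpa [List.isEmpty_iff] using h
      subst hc; simp [pvSplitP, pvNE]
    · have hc : cur ≠ [] := by simpa [List.isEmpty_iff] using h
      rw [if_neg h]
      simp [pvSplitP, pvNE, List.modifyHead, hc]
  | cons c t ih =>
    intro cur acc
    rw [PySem.Chars.split₀.go]
    by_cases hsp : PySem.Chars.isspace c
    · rw [if_pos hsp]
      by_cases hce : cur.isEmpty
      · have hcur : cur = [] := by simpa [List.isEmpty_iff] using hce
        subst hcur
        rw [if_pos (show (List.isEmpty ([] : List Char)) = true from rfl)]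
        rw [ih [] acc]
        simp only [pvSplitP, hsp, if_pos, pv_modifyHead_id, List.reverse_nil,
          List.nil_append]
        rw [pv_filter_cons_nil]
      · have hcur : cur ≠ [] := by simpa [List.isEmpty_iff] using hce
        rw [if_neg hce]
        rw [ih [] (cur.reverse :: acc)]
        have hrev : cur.reverse ≠ [] := by simpa using hcur
        simp [pvSplitP, hsp, pv_modifyHead_id, List.filter_cons, pvNE, hrev, hcur]
    · rw [if_neg hsp]
      rw [ih (c :: cur) acc]
      have hsp' : PySem.Chars.isspace c = false := by simpa using hsp
      simp only [pvSplitP, hsp', Bool.false_eq_true, if_neg, not_false_iff]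
      cases hP : pvSplitP PySem.Chars.isspace t with
      | nil => exact absurd hP (pvSplitP_ne_nil _ _)
      | cons y ys => simp [List.modifyHead, List.append_assoc]

lemma pv_split0_eq (l : List Char) :
    PySem.Chars.split₀ l = (pvSplitP PySem.Chars.isspace l).filter pvNE := by
  rw [PySem.Chars.split₀]
  rw [pv_split0_go l [] []]
  simp [pv_modifyHead_id]

-- ===== structural lemmas about pvSplitP =====

lemma pv_filterNE_dropWhile (p : Char → Bool) (l : List Char) :
    (pvSplitP p (l.dropWhile p)).filter pvNE = (pvSplitP p l).filter pvNE := by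
  induction l with
  | nil => rfl
  | cons c t ih =>
    by_cases h : p c
    · rw [List.dropWhile_cons]
      simp only [h, if_pos]
      rw [ih]
      rw [show pvSplitP p (c :: t) = [] :: pvSplitP p t from by simp [pvSplitP, h]]
      rw [pv_filter_cons_nil]
    · rw [List.dropWhile_cons]
      simp [h]

lemma pv_filterNE_all (p : Char → Bool) (ss : List Char) (h : ∀ c ∈ ss, p c = true) :
    (pvSplitP p ss).filter pvNE = [] := by
  induction ss with
  | nil => simp [pvSplitP, pvNE]
  | cons c t ih =>
    rw [show pvSplitP p (c :: t) = [] :: pvSplitP p t from by simp [pvSplitP, h c (by simp)]]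
    rw [pv_filter_cons_nil]
    exact ih (fun d hd => h d (List.mem_cons_of_mem _ hd))

lemma pv_filterNE_append (p : Char → Bool) (l ss : List Char) (h : ∀ c ∈ ss, p c = true) :
    (pvSplitP p (l ++ ss)).filter pvNE = (pvSplitP p l).filter pvNE := by
  induction l with
  | nil =>
    rw [List.nil_append, pv_filterNE_all p ss h]
    simp [pvSplitP, pvNE]
  | cons c t ih =>
    by_cases hc : p c
    · rw [List.cons_append]
      rw [show pvSplitP p (c :: (t ++ ss)) = [] :: pvSplitP p (t ++ ss) from by
        simp [pvSplitP, hc]]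
      rw [show pvSplitP p (c :: t) = [] :: pvSplitP p t from by simp [pvSplitP, hc]]
      rw [pv_filter_cons_nil, pv_filter_cons_nil]
      exact ih
    · have hc' : p c = false := by simpa using hc
      have htails := ih
      rw [pvSplitP_decomp p (t ++ ss), pvSplitP_decomp p t,
        pv_takeWhile_append_all p t ss h] at htails
      have htl := pv_tail_of_filter_cons htails
      rw [List.cons_append]
      rw [show pvSplitP p (c :: (t ++ ss)) = (pvSplitP p (t ++ ss)).modifyHead (c :: ·) from by
        simp [pvSplitP, hc']]
      rw [show pvSplitP p (c :: t) = (pvSplitP p t).modifyHead (c :: ·) from by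
        simp [pvSplitP, hc']]
      rw [pvSplitP_decomp p (t ++ ss), pvSplitP_decomp p t,
        pv_takeWhile_append_all p t ss h]
      rw [pv_modifyHead_cons, pv_modifyHead_cons]
      rw [pv_filter_cons_ne _ (by simp), pv_filter_cons_ne _ (by simp)]
      rw [htl]

lemma pv_mem_pvSplitP_no (p : Char → Bool) (l : List Char) :
    ∀ x ∈ pvSplitP p l, ∀ c ∈ x, p c = false := by
  induction l with
  | nil =>
    intro x hx
    simp [pvSplitP] at hx
    subst hx; simp
  | cons c t ih =>
    intro x hx
    by_cases h : p c
    · rw [show pvSplitP p (c :: t) = [] :: pvSplitP p t from by simp [pvSplitP, h]] at hx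
      rcases List.mem_cons.mp hx with hx | hx
      · subst hx; simp
      · exact ih x hx
    · have h' : p c = false := by simpa using h
      rw [show pvSplitP p (c :: t) = (pvSplitP p t).modifyHead (c :: ·) from by
        simp [pvSplitP, h']] at hx
      cases hP : pvSplitP p t with
      | nil => exact absurd hP (pvSplitP_ne_nil _ _)
      | cons y ys =>
        rw [hP] at hx
        simp only [List.modifyHead] at hx
        rcases List.mem_cons.mp hx with hx | hx
        · subst hx
          intro d hd
          rcases List.mem_cons.mp hd with hd | hd
          · subst hd; exact h'
          · exact ih y (by rw [hP]; exact List.mem_cons_self ..) d hd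
        · exact ih x (by rw [hP]; exact List.mem_cons_of_mem _ hx)

lemma pv_strip_id (x : List Char) (h : ∀ c ∈ x, PySem.Chars.isspace c = false) :
    PySem.Chars.strip x = x := by
  rw [PySem.Chars.strip, PySem.Chars.lstrip, PySem.Chars.rstrip]
  rw [pv_dropWhile_no _ x h]
  rw [pv_dropWhile_no _ x.reverse (fun c hc => h c (List.mem_reverse.mp hc))]
  simp

lemma pv_filterNE_strip (l : List Char) :
    (pvSplitP PySem.Chars.isspace (PySem.Chars.strip l)).filter pvNE
      = (pvSplitP PySem.Chars.isspace l).filter pvNE := by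
  rw [PySem.Chars.strip, PySem.Chars.lstrip, PySem.Chars.rstrip]
  have hdecomp :
      ((l.dropWhile PySem.Chars.isspace).reverse.dropWhile PySem.Chars.isspace).reverse ++
        ((l.dropWhile PySem.Chars.isspace).reverse.takeWhile PySem.Chars.isspace).reverse
      = l.dropWhile PySem.Chars.isspace := by
    rw [← List.reverse_append, List.takeWhile_append_dropWhile, List.reverse_reverse]
  have hss : ∀ c ∈ ((l.dropWhile PySem.Chars.isspace).reverse.takeWhile PySem.Chars.isspace).reverse,
      PySem.Chars.isspace c = true := by
    intro c hc
    exact List.mem_takeWhile_imp (List.mem_reverse.mp hc)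
  calc (pvSplitP PySem.Chars.isspace
          ((l.dropWhile PySem.Chars.isspace).reverse.dropWhile PySem.Chars.isspace).reverse).filter pvNE
      = (pvSplitP PySem.Chars.isspace
          (((l.dropWhile PySem.Chars.isspace).reverse.dropWhile PySem.Chars.isspace).reverse ++
            ((l.dropWhile PySem.Chars.isspace).reverse.takeWhile PySem.Chars.isspace).reverse)).filter pvNE :=
        (pv_filterNE_append _ _ _ hss).symm
    _ = (pvSplitP PySem.Chars.isspace (l.dropWhile PySem.Chars.isspace)).filter pvNE := by
        rw [hdecomp]
    _ = (pvSplitP PySem.Chars.isspace l).filter pvNE := pv_filterNE_dropWhile _ l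

-- splitting first at ',' and then at whitespace is splitting at both (up to empty pieces)
lemma pv_flatMap_splitP (p : Char → Bool) (a : Char) (l : List Char) :
    ((pvSplitP (fun c => c == a) l).flatMap (pvSplitP p)).filter pvNE
      = (pvSplitP (fun c => p c || c == a) l).filter pvNE := by
  induction l with
  | nil => simp [pvSplitP, pvNE]
  | cons c t ih =>
    by_cases ha : c = a
    · subst ha
      rw [show pvSplitP (fun c' => c' == c) (c :: t) = [] :: pvSplitP (fun c' => c' == c) t from by
        simp [pvSplitP]]
      rw [show pvSplitP (fun c' => p c' || c' == c) (c :: t)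
          = [] :: pvSplitP (fun c' => p c' || c' == c) t from by simp [pvSplitP]]
      rw [List.flatMap_cons]
      rw [show pvSplitP p [] = [[]] from rfl]
      rw [List.singleton_append, pv_filter_cons_nil, pv_filter_cons_nil]
      exact ih
    · have ha' : (c == a) = false := by simp; exact fun hh => absurd hh ha
      cases hP : pvSplitP (fun c' => c' == a) t with
      | nil => exact absurd hP (pvSplitP_ne_nil _ _)
      | cons h0 hs =>
        have e1 : pvSplitP (fun c' => c' == a) (c :: t) = (c :: h0) :: hs := by
          simp [pvSplitP, ha', hP]
        have ih' := ih
        rw [hP, List.flatMap_cons] at ih'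
        by_cases hp : p c
        · have e2 : pvSplitP p (c :: h0) = [] :: pvSplitP p h0 := by simp [pvSplitP, hp]
          have e3 : pvSplitP (fun c' => p c' || c' == a) (c :: t)
              = [] :: pvSplitP (fun c' => p c' || c' == a) t := by simp [pvSplitP, hp]
          rw [e1, List.flatMap_cons, e2, e3, List.cons_append, pv_filter_cons_nil,
            pv_filter_cons_nil]
          exact ih'
        · have hp' : p c = false := by simpa using hp
          cases hPy : pvSplitP p h0 with
          | nil => exact absurd hPy (pvSplitP_ne_nil _ _)
          | cons y ys =>
            cases hPz : pvSplitP (fun c' => p c' || c' == a) t with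
            | nil => exact absurd hPz (pvSplitP_ne_nil _ _)
            | cons z zs =>
              have e2 : pvSplitP p (c :: h0) = (c :: y) :: ys := by
                simp [pvSplitP, hp', hPy]
              have e3 : pvSplitP (fun c' => p c' || c' == a) (c :: t) = (c :: z) :: zs := by
                simp [pvSplitP, hp', ha', hPz]
              have hyz : y = z := by
                have h1 : y = h0.takeWhile (fun c' => !p c') := by
                  have := pvSplitP_headD p h0; rw [hPy] at this; exact this
                have h2 : h0 = t.takeWhile (fun c' => !(c' == a)) := by
                  have := pvSplitP_headD (fun c' => c' == a) t; rw [hP] at this; exact this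
                have h3 : z = t.takeWhile (fun c' => !(p c' || c' == a)) := by
                  have := pvSplitP_headD (fun c' => p c' || c' == a) t; rw [hPz] at this
                  exact this
                rw [h1, h2, h3, List.takeWhile_takeWhile]
                congr 1
                funext d
                cases hd : p d <;> cases hda : d == a <;> simp [hd, hda]
              subst hyz
              rw [hPy] at ih'
              rw [hPz] at ih'
              have ih'' : (ys ++ hs.flatMap (pvSplitP p)).filter pvNE = zs.filter pvNE := by
                have hcons : (y :: (ys ++ hs.flatMap (pvSplitP p))).filter pvNE
                    = (y :: zs).filter pvNE := by
                  rw [← List.cons_append]; exact ih'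
                exact pv_tail_of_filter_cons hcons
              rw [e1, List.flatMap_cons, e2, e3, List.cons_append]
              rw [pv_filter_cons_ne _ (by simp), pv_filter_cons_ne _ (by simp)]
              rw [ih'']

lemma pv_splitP_map (p q : Char → Bool) (f : Char → Char) (l : List Char)
    (h : ∀ c ∈ l, q (f c) = p c ∧ (p c = false → f c = c)) :
    pvSplitP q (l.map f) = pvSplitP p l := by
  induction l with
  | nil => rfl
  | cons c t ih =>
    obtain ⟨h1, h2⟩ := h c (by simp)
    have ih' := ih (fun d hd => h d (List.mem_cons_of_mem _ hd))
    rw [List.map_cons]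
    by_cases hp : p c
    · rw [show pvSplitP q (f c :: List.map f t) = [] :: pvSplitP q (List.map f t) from by
        simp [pvSplitP, h1, hp]]
      rw [show pvSplitP p (c :: t) = [] :: pvSplitP p t from by simp [pvSplitP, hp]]
      rw [ih']
    · have hp' : p c = false := by simpa using hp
      rw [show pvSplitP q (f c :: List.map f t)
          = (pvSplitP q (List.map f t)).modifyHead (f c :: ·) from by
        simp [pvSplitP, h1, hp']]
      rw [ih', h2 hp']
      rw [show pvSplitP p (c :: t) = (pvSplitP p t).modifyHead (c :: ·) from by
        simp [pvSplitP, hp']]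

lemma pv_filter_absorb (q : List Char → Bool) (hq : q [] = false) (X : List (List Char)) :
    X.filter q = (X.filter pvNE).filter q := by
  rw [List.filter_filter]
  apply List.filter_congr
  intro x _
  cases x with
  | nil => simp [hq, pvNE]
  | cons c t => simp [pvNE]

lemma pv_flatMap_filter_map (L : List (List Char)) (h : List Char → List (List Char))
    (q : List Char → Bool) (f : List Char → List Char) :
    L.flatMap (fun m => ((h m).filter q).map f) = ((L.flatMap h).filter q).map f := by
  induction L with
  | nil => simp
  | cons m L ih => simp [List.flatMap_cons, List.filter_append, List.map_append, ih]

lemma pv_flatMap_congr {α β : Type} (L : List α) (f g : α → List β)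
    (h : ∀ x ∈ L, f x = g x) : L.flatMap f = L.flatMap g := by
  induction L with
  | nil => rfl
  | cons x L ih =>
    simp only [List.flatMap_cons]
    rw [h x (by simp), ih (fun y hy => h y (List.mem_cons_of_mem _ hy))]

lemma pv_char_toNat_inj (c d : Char) (h : c.toNat = d.toNat) : c = d := by
  have := congrArg Char.ofNat h
  rwa [Char.ofNat_toNat, Char.ofNat_toNat] at this

lemma pvN_fact (c : Char) (hc : pvDomChar c = true) :
    (PySem.Chars.isspace (pvN c) || (pvN c == ',')) = pvIsDelim c
      ∧ (pvIsDelim c = false → pvN c = c) := by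
  by_cases h1 : c = '\n'; · subst h1; decide
  by_cases h2 : c = '\t'; · subst h2; decide
  by_cases h3 : c = ';'; · subst h3; decide
  by_cases h4 : c = ' '; · subst h4; decide
  by_cases h5 : c = '\r'; · subst h5; decide
  by_cases h6 : c = ','; · subst h6; decide
  have e1 : (c == '\n') = false := by simp [h1]
  have e2 : (c == '\t') = false := by simp [h2]
  have e3 : (c == ';') = false := by simp [h3]
  have e4 : (c == ' ') = false := by simp [h4]
  have e5 : (c == '\r') = false := by simp [h5]
  have e6 : (c == ',') = false := by simp [h6]
  have hpvN : pvN c = c := by simp [pvN, e1, e2, e3]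
  have hdl : pvIsDelim c = false := by simp [pvIsDelim, e1, e2, e3, e4, e5, e6]
  rw [hpvN, hdl]
  refine ⟨?_, fun _ => rfl⟩
  rw [e6]
  have hn9 : c.toNat ≠ 9 := fun hh => h2 (pv_char_toNat_inj c '\t' (by rw [hh]; rfl))
  have hn10 : c.toNat ≠ 10 := fun hh => h1 (pv_char_toNat_inj c '\n' (by rw [hh]; rfl))
  have hn13 : c.toNat ≠ 13 := fun hh => h5 (pv_char_toNat_inj c '\r' (by rw [hh]; rfl))
  have hn32 : c.toNat ≠ 32 := fun hh => h4 (pv_char_toNat_inj c ' ' (by rw [hh]; rfl))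
  have hdom : ((32 ≤ c.toNat ∧ c.toNat ≤ 126 ∨ c.toNat = 9) ∨ c.toNat = 10) ∨ c.toNat = 13 := by
    simpa [pvDomChar, Bool.or_eq_true, Bool.and_eq_true, decide_eq_true_eq] using hc
  have hsp : PySem.Chars.isspace c = false := by
    simp only [PySem.Chars.isspace, Bool.or_eq_false_iff, Bool.and_eq_false_iff,
      decide_eq_false_iff_not]
    omega
  simp [hsp]

-- B's resplit agrees with pvSplitP up to empty pieces
lemma pv_reSplit_filterNE_aux (n : Nat) :
    ∀ l : List Char, l.length ≤ n →
      (pvReSplit l).filter pvNE = (pvSplitP pvIsDelim l).filter pvNE := by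
  induction n with
  | zero =>
    intro l hl
    have hnil : l = [] := by
      cases l with
      | nil => rfl
      | cons a b => simp at hl
    subst hnil
    rw [pvReSplit]
    simp [pvSplitP]
  | succ n ihn =>
    intro l hl
    rw [pvReSplit]
    cases hrest : l.dropWhile (fun c => !pvIsDelim c) with
    | nil =>
      rw [dif_pos (by simp)]
      rw [pvSplitP_decomp pvIsDelim l, hrest]
    | cons x r =>
      rw [dif_neg (by simp)]
      rw [pvSplitP_decomp pvIsDelim l, hrest]
      have hlenr : (r.dropWhile pvIsDelim).length ≤ n := by
        have h1 : (x :: r).length ≤ l.length := by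
          rw [← hrest]; exact List.length_dropWhile_le _ _
        have h2 : (r.dropWhile pvIsDelim).length ≤ r.length := List.length_dropWhile_le _ _
        simp only [List.length_cons] at h1
        omega
      have htail : (pvReSplit ((x :: r).tail.dropWhile pvIsDelim)).filter pvNE
          = (pvSplitP pvIsDelim r).filter pvNE := by
        rw [show (x :: r).tail = r from rfl]
        rw [ihn (r.dropWhile pvIsDelim) hlenr]
        exact pv_filterNE_dropWhile pvIsDelim r
      rw [List.filter_cons, List.filter_cons, htail]

lemma pv_reSplit_filterNE (l : List Char) :
    (pvReSplit l).filter pvNE = (pvSplitP pvIsDelim l).filter pvNE :=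
  pv_reSplit_filterNE_aux l.length l (le_refl _)

-- ===== VERDICT (by name: the statement is the Claim_ definition above) =====
theorem split_cve_tokens_spec : Claim_equal_split_cve_tokens := by
  intro s hDom
  have hDomL : ∀ c ∈ s.toList, pvDomChar c = true := by
    have hD : pvDomStr s = true := hDom
    simpa [pvDomStr, List.all_eq_true] using hD
  unfold Spec_split_cve_tokens
  have hA : split_cve_tokens s =
      (((PySem.Chars.splitOn
            (PySem.Chars.replace
              (PySem.Chars.replace (PySem.Chars.replace s.toList ['\n'] [' ']) ['\t'] [' '])
              [';'] [','])
            [',']).map PySem.Chars.strip).foldl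
        (fun tokens p =>
          if p.isEmpty then tokens
          else (PySem.Chars.split₀ p).foldl (fun tokens t =>
            if PySem.Chars.startswith (PySem.Chars.upper (PySem.Chars.strip t))
                ['C', 'V', 'E', '-'] = true then
              tokens ++ [PySem.Chars.upper (PySem.Chars.strip t)]
            else tokens) tokens) []).map String.ofList := rfl
  rw [hA]
  rw [pv_replace_single, pv_replace_single, pv_replace_single, List.map_map, List.map_map]
  rw [show (((fun c => if c == ';' then ',' else c) ∘ (fun c => if c == '\t' then ' ' else c)) ∘
        (fun c => if c == '\n' then ' ' else c)) = pvN from rfl]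
  rw [pv_splitOn_single]
  -- the two nested folds of A are one flatMap
  have houter : ∀ parts : List (List Char),
      parts.foldl (fun tokens p =>
        if p.isEmpty then tokens
        else (PySem.Chars.split₀ p).foldl (fun tokens t =>
          if PySem.Chars.startswith (PySem.Chars.upper (PySem.Chars.strip t))
              ['C', 'V', 'E', '-'] = true then
            tokens ++ [PySem.Chars.upper (PySem.Chars.strip t)]
          else tokens) tokens) []
      = parts.flatMap (fun p =>
          (((pvSplitP PySem.Chars.isspace p).filter pvNE).filter
              (fun t => PySem.Chars.startswith (PySem.Chars.upper (PySem.Chars.strip t))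
                ['C', 'V', 'E', '-'])).map
            (fun t => PySem.Chars.upper (PySem.Chars.strip t))) := by
    intro parts
    have hstep : ∀ (acc : List (List Char)) (p : List Char), p ∈ parts →
        (if p.isEmpty then acc
         else (PySem.Chars.split₀ p).foldl (fun tokens t =>
           if PySem.Chars.startswith (PySem.Chars.upper (PySem.Chars.strip t))
               ['C', 'V', 'E', '-'] = true then
             tokens ++ [PySem.Chars.upper (PySem.Chars.strip t)]
           else tokens) acc)
        = acc ++ (((pvSplitP PySem.Chars.isspace p).filter pvNE).filter
              (fun t => PySem.Chars.startswith (PySem.Chars.upper (PySem.Chars.strip t))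
                ['C', 'V', 'E', '-'])).map
            (fun t => PySem.Chars.upper (PySem.Chars.strip t)) := by
      intro acc p _
      by_cases hp : p.isEmpty
      · have hpe : p = [] := by simpa [List.isEmpty_iff] using hp
        subst hpe
        simp [pvSplitP, pvNE]
      · rw [if_neg hp, pv_split0_eq]
        exact PySem.List.foldl_append_if _ _ _ _
    rw [PySem.List.foldl_congr_mem _ _ _ _ hstep]
    rw [PySem.List.foldl_append_eq_flatMap]
    rw [List.nil_append]
  rw [houter]
  rw [List.flatMap_map]
  -- per-piece: strip is invisible to the whitespace split and to the surviving tokens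
  have hpiece : ∀ m : List Char,
      (((pvSplitP PySem.Chars.isspace (PySem.Chars.strip m)).filter pvNE).filter
          (fun t => PySem.Chars.startswith (PySem.Chars.upper (PySem.Chars.strip t))
            ['C', 'V', 'E', '-'])).map
        (fun t => PySem.Chars.upper (PySem.Chars.strip t))
      = ((pvSplitP PySem.Chars.isspace m).filter
          (fun t => PySem.Chars.startswith (PySem.Chars.upper t) ['C', 'V', 'E', '-'])).map
          PySem.Chars.upper := by
    intro m
    rw [pv_filterNE_strip m]
    have hmem : ∀ x ∈ (pvSplitP PySem.Chars.isspace m).filter pvNE,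
        PySem.Chars.strip x = x :=
      fun x hx => pv_strip_id x (pv_mem_pvSplitP_no _ m x (List.mem_of_mem_filter hx))
    rw [List.filter_congr
      (q := fun t => PySem.Chars.startswith (PySem.Chars.upper t) ['C', 'V', 'E', '-'])
      (fun x hx => by rw [hmem x hx])]
    rw [List.map_congr_left
      (g := PySem.Chars.upper)
      (fun x hx => by rw [hmem x (List.mem_of_mem_filter hx)])]
    rw [← pv_filter_absorb _ rfl]
  rw [pv_flatMap_congr _ _ _ (fun m _ => hpiece m)]
  rw [pv_flatMap_filter_map (pvSplitP (fun c => c == ',') (List.map pvN s.toList))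
    (pvSplitP PySem.Chars.isspace)
    (fun t => PySem.Chars.startswith (PySem.Chars.upper t) ['C', 'V', 'E', '-'])
    PySem.Chars.upper]
  rw [pv_filter_absorb _ rfl
    ((pvSplitP (fun c => c == ',') (List.map pvN s.toList)).flatMap
      (pvSplitP PySem.Chars.isspace))]
  rw [pv_flatMap_splitP]
  rw [pv_splitP_map pvIsDelim (fun c => PySem.Chars.isspace c || c == ',') pvN s.toList
    (fun c hcl => pvN_fact c (hDomL c hcl))]
  rw [← pv_filter_absorb _ rfl (pvSplitP pvIsDelim s.toList)]
  rw [List.map_map]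
  have hB : split_cve_tokens_alt s =
      ((pvReSplit s.toList).filter
          (fun t => PySem.Chars.startswith (PySem.Chars.upper t) ['C', 'V', 'E', '-'])).map
        (fun t => String.ofList (PySem.Chars.upper t)) := rfl
  rw [hB]
  rw [pv_filter_absorb _ rfl (pvReSplit s.toList)]
  rw [pv_reSplit_filterNE]
  rw [← pv_filter_absorb _ rfl (pvSplitP pvIsDelim s.toList)]
  rfl
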